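-- pv_equiv track=rewrite | github.com/asrvsn/matgeo | src/matgeo/utils/poly.py | face_adjacency
-- ===== SOURCE A (Python) =====
-- from typing import Generator, Tuple, List, Union
--
-- def traverse_face_edges(faces: list) -> Generator:
--     ''' Compute the incident face pairs '''
--     seen = set()
--     for i in range(len(faces)):
--         for j in range(len(faces)):
--             if i == j:
--                 continue
--             e = [i, j]
--             if not (frozenset(e) in seen):
--                 seen.add(frozenset(e))
--                 if len(set(faces[i]) & set(faces[j])) == 2: # Faces share an edge
--                     yield e
--
-- def face_adjacency(faces: list) -> dict:
--     ''' Compute the adjacency list of faces '''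
--     adj = {}
--     for e in traverse_face_edges(faces):
--         i, j = e
--         if not i in adj:
--             adj[i] = [j]
--         else:
--             adj[i].append(j)
--         if not j in adj:
--             adj[j] = [i]
--         else:
--             adj[j].append(i)
--     return adj
-- ===== SOURCE B (Python) =====
-- def face_adjacency(faces: list) -> dict:
--     ''' Compute the adjacency list of faces (vertex->faces index instead of all-pairs scan) '''
--     vert2faces = {}
--     for idx, f in enumerate(faces):
--         for v in dict.fromkeys(f):
--             vert2faces[v] = vert2faces.get(v, [])
--             vert2faces[v].append(idx)
--     adj = {}
--     for i, f in enumerate(faces):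
--         cnt = {}
--         for v in dict.fromkeys(f):
--             for j in vert2faces[v]:
--                 if j > i:
--                     cnt[j] = cnt.get(j, 0) + 1
--         for j in sorted(j for j, c in cnt.items() if c == 2):
--             if not i in adj:
--                 adj[i] = [j]
--             else:
--                 adj[i].append(j)
--             if not j in adj:
--                 adj[j] = [i]
--             else:
--                 adj[j].append(i)
--     return adj
-- ===== Notes on version B (the rewrite author's own statement) =====
-- stated objective: faster
-- what changed: Replaces A's all-pairs face scan (set-intersection of every face pair, with a seen-set of frozensets) by a vertex->faces inverted index: shared-vertex counts per candidate neighbour are accumulated from the per-vertex face lists, pairs with count 2 become edges, and each face's neighbour candidates are emitted sorted, reproducing A's exact dict insertion order.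
import Mathlib
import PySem

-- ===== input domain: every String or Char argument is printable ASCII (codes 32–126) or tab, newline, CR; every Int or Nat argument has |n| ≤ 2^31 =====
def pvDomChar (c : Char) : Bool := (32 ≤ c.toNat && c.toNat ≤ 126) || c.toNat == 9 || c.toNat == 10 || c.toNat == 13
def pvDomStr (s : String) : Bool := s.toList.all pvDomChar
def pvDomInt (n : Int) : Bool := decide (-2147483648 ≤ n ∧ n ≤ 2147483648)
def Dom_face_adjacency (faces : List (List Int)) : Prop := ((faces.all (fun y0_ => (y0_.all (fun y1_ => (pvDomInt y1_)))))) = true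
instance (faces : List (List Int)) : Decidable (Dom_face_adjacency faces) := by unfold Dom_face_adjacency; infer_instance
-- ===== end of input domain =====

-- B replaces A's all-pairs scan (set intersection per face pair) by a vertex->faces
-- inverted index with per-pair shared-vertex counting; same return value.


-- ===== PORT A =====
-- Notes on exactness: faces[i] / faces[j] are only read with 0 ≤ i, j < len(faces), so
-- pyGetD with a dummy default is exact; frozenset({i, j}) with i ≠ j is modelled exactly
-- by the ordered pair (min i j, max i j) (two-element frozensets of ints are in bijection
-- with such pairs, and only membership in `seen` is used).
def face_adjacency (faces : List (List Int)) : List (Int × List Int) :=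
  let n : Int := (faces.length : Int)
  let st :=
    (PySem.List.pyRange 0 n).foldl (fun st i =>
      (PySem.List.pyRange 0 n).foldl (fun st j =>
        if i == j then st
        else
          let e := (min i j, max i j)
          if st.1.contains e then st
          else
            if PySem.Set.len (PySem.Set.inter
                  (PySem.Set.ofList (PySem.List.pyGetD faces i []))
                  (PySem.Set.ofList (PySem.List.pyGetD faces j []))) == 2 then
              (st.1 ++ [e], st.2 ++ [(i, j)])
            else (st.1 ++ [e], st.2)) st)
      (([], []) : List (Int × Int) × List (Int × Int))
  (st.2.foldl (fun adj e =>
      let adj2 := match adj.get? e.1 with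
        | none => adj.insert e.1 [e.2]
        | some l => adj.insert e.1 (l ++ [e.2])
      match adj2.get? e.2 with
        | none => adj2.insert e.2 [e.1]
        | some l => adj2.insert e.2 (l ++ [e.1])) (PySem.Dict.empty : PySem.Dict Int (List Int))).items

-- ===== PORT B =====
-- Notes on exactness: dict.fromkeys(f) (ordered dedup) is PySem.List.dedup; in the second
-- phase vert2faces[v] is read only for v ∈ f, so the key is present and getD [] is exact.
def face_adjacency_alt (faces : List (List Int)) : List (Int × List Int) :=
  let v2f :=
    (PySem.List.enumerate faces).foldl (fun d p =>
      (PySem.List.dedup p.2).foldl (fun d v => d.insert v (d.getD v [] ++ [p.1])) d)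
      (PySem.Dict.empty : PySem.Dict Int (List Int))
  ((PySem.List.enumerate faces).foldl (fun adj p =>
      let cnt :=
        (PySem.List.dedup p.2).foldl (fun c v =>
          (v2f.getD v []).foldl (fun c j =>
            if j > p.1 then c.insert j (c.getD j 0 + 1) else c) c)
          (PySem.Dict.empty : PySem.Dict Int Int)
      (PySem.List.sorted ((cnt.items.filter (fun jc => jc.2 == 2)).map (fun jc => jc.1))
          (fun j => j)).foldl (fun adj j =>
        let adj2 := match adj.get? p.1 with
          | none => adj.insert p.1 [j]
          | some l => adj.insert p.1 (l ++ [j])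
        match adj2.get? j with
          | none => adj2.insert j [p.1]
          | some l => adj2.insert j (l ++ [p.1])) adj)
      (PySem.Dict.empty : PySem.Dict Int (List Int))).items

-- ===== PRECONDITION & SPEC =====
def Spec_face_adjacency (faces : List (List Int)) (out : List (Int × List Int)) : Prop := out = face_adjacency_alt faces
instance (faces : List (List Int)) (out : List (Int × List Int)) : Decidable (Spec_face_adjacency faces out) := by unfold Spec_face_adjacency; infer_instance

-- ===== CLAIM (what is proved, stated in full; the proofs are below) =====
def Claim_equal_face_adjacency : Prop := ∀ (faces : List (List Int)), Dom_face_adjacency faces → Spec_face_adjacency faces (face_adjacency faces)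

-- ===== LEMMAS AND PROOFS =====

-- the condition "faces i and j share exactly two (distinct) vertices", as A computes it
def condE (faces : List (List Int)) (i j : Int) : Bool :=
  PySem.Set.len (PySem.Set.inter
    (PySem.Set.ofList (PySem.List.pyGetD faces i []))
    (PySem.Set.ofList (PySem.List.pyGetD faces j []))) == 2

def rowE (faces : List (List Int)) (i : Int) : List Int :=
  (PySem.List.pyRange (i + 1) (faces.length : Int)).filter (condE faces i)

def edgesUpTo (faces : List (List Int)) (i : Int) : List (Int × Int) :=
  (PySem.List.pyRange 0 i).flatMap (fun a => (rowE faces a).map (fun b => (a, b)))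

def seenUpTo (n i : Int) : List (Int × Int) :=
  (PySem.List.pyRange 0 i).flatMap (fun a => (PySem.List.pyRange (a + 1) n).map (fun b => (a, b)))

-- A's inner-loop step (for fixed i)
def stepIn (faces : List (List Int)) (i : Int)
    (st : List (Int × Int) × List (Int × Int)) (j : Int) : List (Int × Int) × List (Int × Int) :=
  if i == j then st
  else
    let e := (min i j, max i j)
    if st.1.contains e then st
    else
      if condE faces i j then (st.1 ++ [e], st.2 ++ [(i, j)])
      else (st.1 ++ [e], st.2)

-- the shared adjacency-building step (A folds it over its edge list; B's inner loop is it at e = (i, j))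
def gStep (adj : PySem.Dict Int (List Int)) (e : Int × Int) : PySem.Dict Int (List Int) :=
  let adj2 := match adj.get? e.1 with
    | none => adj.insert e.1 [e.2]
    | some l => adj.insert e.1 (l ++ [e.2])
  match adj2.get? e.2 with
    | none => adj2.insert e.2 [e.1]
    | some l => adj2.insert e.2 (l ++ [e.1])

lemma face_adjacency_eq (faces : List (List Int)) :
    face_adjacency faces =
      (((PySem.List.pyRange 0 (faces.length : Int)).foldl (fun st i =>
          (PySem.List.pyRange 0 (faces.length : Int)).foldl (stepIn faces i) st)
        (([], []) : List (Int × Int) × List (Int × Int))).2.foldl gStep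
        (PySem.Dict.empty : PySem.Dict Int (List Int))).items := rfl

-- B-side abbreviations (definitionally the pieces of face_adjacency_alt)
def v2fD (faces : List (List Int)) : PySem.Dict Int (List Int) :=
  (PySem.List.enumerate faces).foldl (fun d p =>
    (PySem.List.dedup p.2).foldl (fun d v => d.insert v (d.getD v [] ++ [p.1])) d)
    (PySem.Dict.empty : PySem.Dict Int (List Int))

def vIdx (faces : List (List Int)) (v : Int) : List Int :=
  ((PySem.List.enumerate faces).filter (fun p => decide (v ∈ p.2))).map (fun p => p.1)

def rowCnt (faces : List (List Int)) (i : Int) (f : List Int) : PySem.Dict Int Int :=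
  (PySem.List.dedup f).foldl (fun c v =>
    ((v2fD faces).getD v []).foldl (fun c j =>
      if j > i then c.insert j (c.getD j 0 + 1) else c) c)
    (PySem.Dict.empty : PySem.Dict Int Int)

def bigL (faces : List (List Int)) (i : Int) (f : List Int) : List Int :=
  (PySem.List.dedup f).flatMap (fun v => (vIdx faces v).filter (fun j => decide (j > i)))

lemma face_adjacency_alt_eq (faces : List (List Int)) :
    face_adjacency_alt faces =
      ((PySem.List.enumerate faces).foldl (fun adj p =>
        (PySem.List.sorted (((rowCnt faces p.1 p.2).items.filter (fun jc => jc.2 == 2)).map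
            (fun jc => jc.1)) (fun j => j)).foldl (fun adj j => gStep adj (p.1, j)) adj)
        (PySem.Dict.empty : PySem.Dict Int (List Int))).items := rfl

-- ---- generic helpers ----
lemma pyRange_nil_of_le {a b : Int} (h : b ≤ a) : PySem.List.pyRange a b = [] := by
  rw [List.eq_nil_iff_forall_not_mem]
  intro x hx; rw [PySem.List.mem_pyRange_one] at hx; omega

lemma pyRange_pairwise_aux : ∀ (k : Nat) (a b : Int), (b - a).toNat ≤ k →
    (PySem.List.pyRange a b).Pairwise (· < ·)
  | 0, a, b, h => by rw [pyRange_nil_of_le (by omega)]; exact List.Pairwise.nil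
  | (k + 1), a, b, h => by
    by_cases hab : a < b
    · rw [PySem.List.pyRange_one_cons hab]
      refine List.Pairwise.cons ?_ (pyRange_pairwise_aux k (a + 1) b (by omega))
      intro x hx; rw [PySem.List.mem_pyRange_one] at hx; omega
    · rw [pyRange_nil_of_le (by omega)]; exact List.Pairwise.nil

lemma pyRange_pairwise_lt (a b : Int) : (PySem.List.pyRange a b).Pairwise (· < ·) := by
  exact pyRange_pairwise_aux (b - a).toNat a b le_rfl

lemma pyRange_nodup (a b : Int) : (PySem.List.pyRange a b).Nodup := by
  exact (pyRange_pairwise_lt a b).imp (fun h => ne_of_lt h)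

lemma foldl_fixed {α β : Type} (l : List α) (f : β → α → β) (s : β)
    (h : ∀ x ∈ l, f s x = s) : l.foldl f s = s := by
  induction l with
  | nil => rfl
  | cons x t ih =>
    rw [List.foldl_cons, h x (by simp)]
    exact ih (fun y hy => h y (by simp [hy]))

-- ---- A-side ----
lemma mem_seenUpTo (n i : Int) (p : Int × Int) :
    p ∈ seenUpTo n i ↔ 0 ≤ p.1 ∧ p.1 < i ∧ p.1 < p.2 ∧ p.2 < n := by
  obtain ⟨x, y⟩ := p
  simp only [seenUpTo, List.mem_flatMap, List.mem_map, PySem.List.mem_pyRange_one, Prod.mk.injEq]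
  constructor
  · rintro ⟨a, ⟨ha0, hai⟩, b, ⟨hb1, hb2⟩, rfl, rfl⟩
    exact ⟨ha0, hai, by omega, hb2⟩
  · rintro ⟨h0, h1, h2, h3⟩
    exact ⟨x, ⟨h0, h1⟩, y, ⟨by omega, h3⟩, rfl, rfl⟩

lemma seenUpTo_succ (n i : Int) (h : 0 ≤ i) :
    seenUpTo n (i + 1) = seenUpTo n i ++ (PySem.List.pyRange (i + 1) n).map (fun b => (i, b)) := by
  unfold seenUpTo
  rw [PySem.List.pyRange_one_append 0 i (i + 1) h (by omega), List.flatMap_append]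
  congr 1
  rw [PySem.List.pyRange_one_cons (by omega : i < i + 1), pyRange_nil_of_le (le_refl (i + 1))]
  simp

lemma edgesUpTo_succ (faces : List (List Int)) (i : Int) (h : 0 ≤ i) :
    edgesUpTo faces (i + 1) = edgesUpTo faces i ++ (rowE faces i).map (fun b => (i, b)) := by
  unfold edgesUpTo
  rw [PySem.List.pyRange_one_append 0 i (i + 1) h (by omega), List.flatMap_append]
  congr 1
  rw [PySem.List.pyRange_one_cons (by omega : i < i + 1), pyRange_nil_of_le (le_refl (i + 1))]
  simp

lemma innerRowAux (faces : List (List Int)) (i : Int) (l : List Int) :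
    ∀ (processed : List Int) (acc : List (Int × Int)),
    (∀ j ∈ l, i < j) → l.Nodup → (∀ j ∈ l, j ∉ processed) →
    l.foldl (stepIn faces i)
        (seenUpTo (faces.length : Int) i ++ processed.map (fun j => (i, j)), acc)
      = (seenUpTo (faces.length : Int) i ++ (processed ++ l).map (fun j => (i, j)),
         acc ++ (l.filter (condE faces i)).map (fun j => (i, j))) := by
  induction l with
  | nil => intro processed acc _ _ _; simp
  | cons j t ih =>
    intro processed acc hl hnd hdis
    have hij : i < j := hl j (by simp)
    rw [List.foldl_cons]
    have hcont : ((seenUpTo (faces.length : Int) i ++ processed.map (fun x => (i, x))).contains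
        ((min i j, max i j) : Int × Int)) = false := by
      simp only [min_eq_left hij.le, max_eq_right hij.le]
      rw [Bool.eq_false_iff]
      intro hc
      rcases List.mem_append.mp (List.contains_iff_mem.mp hc) with hc | hc
      · rw [mem_seenUpTo] at hc; omega
      · rcases List.mem_map.mp hc with ⟨x, hx, hxe⟩
        cases hxe
        exact hdis j (by simp) hx
    have hstep : stepIn faces i
        (seenUpTo (faces.length : Int) i ++ processed.map (fun x => (i, x)), acc) j
        = (seenUpTo (faces.length : Int) i ++ (processed ++ [j]).map (fun x => (i, x)),
           acc ++ if condE faces i j then [(i, j)] else []) := by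
      unfold stepIn
      rw [if_neg (by simp [hij.ne] : ¬ (i == j) = true)]
      simp only [hcont, Bool.false_eq_true, if_false]
      by_cases hc : condE faces i j
      · rw [if_pos hc]
        simp [hc, min_eq_left hij.le, max_eq_right hij.le]
      · rw [if_neg (by simp [hc])]
        simp [hc, min_eq_left hij.le, max_eq_right hij.le]
    rw [hstep]
    have hjt : j ∉ t := (List.nodup_cons.mp hnd).1
    rw [ih (processed ++ [j]) (acc ++ if condE faces i j then [(i, j)] else [])
        (fun y hy => hl y (by simp [hy])) (List.nodup_cons.mp hnd).2
        (fun y hy hmem => by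
          rcases List.mem_append.mp hmem with h | h
          · exact hdis y (by simp [hy]) h
          · rw [List.mem_singleton] at h
            exact hjt (h ▸ hy))]
    rw [List.filter_cons]
    by_cases hc : condE faces i j
    · simp [hc, List.append_assoc]
    · simp [hc, List.append_assoc]

lemma outer_row (faces : List (List Int)) (i : Int) (h0 : 0 ≤ i) (h1 : i < (faces.length : Int))
    (acc : List (Int × Int)) :
    (PySem.List.pyRange 0 (faces.length : Int)).foldl (stepIn faces i)
        (seenUpTo (faces.length : Int) i, acc)
      = (seenUpTo (faces.length : Int) (i + 1), acc ++ (rowE faces i).map (fun j => (i, j))) := by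
  have hsplit : PySem.List.pyRange 0 (faces.length : Int)
      = PySem.List.pyRange 0 i ++ i :: PySem.List.pyRange (i + 1) (faces.length : Int) := by
    rw [PySem.List.pyRange_one_append 0 i (faces.length : Int) h0 (le_of_lt h1),
        PySem.List.pyRange_one_cons h1]
  rw [hsplit, List.foldl_append]
  have hfix : (PySem.List.pyRange 0 i).foldl (stepIn faces i)
      (seenUpTo (faces.length : Int) i, acc) = (seenUpTo (faces.length : Int) i, acc) := by
    apply foldl_fixed
    intro j hj
    rw [PySem.List.mem_pyRange_one] at hj
    unfold stepIn
    rw [if_neg (by simp only [beq_iff_eq]; omega : ¬ (i == j) = true)]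
    simp only
    rw [if_pos ?_]
    show ((seenUpTo (faces.length : Int) i, acc) : _ × _).1.contains (min i j, max i j) = true
    rw [min_eq_right hj.2.le, max_eq_left hj.2.le]
    exact List.contains_iff_mem.mpr ((mem_seenUpTo _ _ _).mpr ⟨hj.1, hj.2, hj.2, h1⟩)
  rw [hfix, List.foldl_cons]
  have hself : stepIn faces i (seenUpTo (faces.length : Int) i, acc) i
      = (seenUpTo (faces.length : Int) i, acc) := by
    unfold stepIn
    rw [if_pos (by simp)]
  rw [hself]
  have haux := innerRowAux faces i (PySem.List.pyRange (i + 1) (faces.length : Int)) [] acc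
      (fun j hj => by rw [PySem.List.mem_pyRange_one] at hj; omega)
      (pyRange_nodup _ _)
      (fun j _ h => by simp at h)
  simp only [List.map_nil, List.append_nil, List.nil_append] at haux
  rw [haux, seenUpTo_succ _ _ h0]
  rfl

lemma outer_fold (faces : List (List Int)) :
    ∀ k : Nat, k ≤ faces.length →
    (PySem.List.pyRange 0 (k : Int)).foldl (fun st i =>
        (PySem.List.pyRange 0 (faces.length : Int)).foldl (stepIn faces i) st)
      (([], []) : List (Int × Int) × List (Int × Int))
      = (seenUpTo (faces.length : Int) (k : Int), edgesUpTo faces (k : Int)) := by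
  intro k
  induction k with
  | zero =>
    intro _
    rw [Nat.cast_zero, pyRange_nil_of_le le_rfl, List.foldl_nil]
    unfold seenUpTo edgesUpTo
    rw [pyRange_nil_of_le le_rfl]
    simp
  | succ k ih =>
    intro hk
    have hk' : (k : Int) < (faces.length : Int) := by omega
    have hcast : ((k + 1 : Nat) : Int) = (k : Int) + 1 := by push_cast; ring
    rw [hcast, PySem.List.pyRange_one_append 0 (k : Int) ((k : Int) + 1) (by omega) (by omega),
        PySem.List.pyRange_one_cons (by omega : (k : Int) < (k : Int) + 1),
        pyRange_nil_of_le le_rfl, List.foldl_append, List.foldl_cons, List.foldl_nil]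
    rw [ih (by omega), outer_row faces (k : Int) (by omega) hk',
        edgesUpTo_succ faces (k : Int) (by omega)]

lemma A_items (faces : List (List Int)) :
    face_adjacency faces
      = ((edgesUpTo faces (faces.length : Int)).foldl gStep
          (PySem.Dict.empty : PySem.Dict Int (List Int))).items := by
  rw [face_adjacency_eq, outer_fold faces faces.length le_rfl]

-- ---- B-side ----
lemma enumerate_cons {α : Type} (x : α) (t : List α) (s : Int) :
    PySem.List.enumerate (x :: t) s = (s, x) :: PySem.List.enumerate t (s + 1) := rfl

lemma mem_enumerate {α : Type} :
    ∀ (l : List α) (s : Int) (p : Int × α),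
    p ∈ PySem.List.enumerate l s ↔ ∃ k : Nat, k < l.length ∧ p.1 = s + k ∧ l[k]? = some p.2 := by
  intro l
  induction l with
  | nil =>
    intro s p
    rw [show PySem.List.enumerate ([] : List α) s = [] from rfl]
    simp
  | cons x t ih =>
    intro s p
    rw [enumerate_cons, List.mem_cons, ih]
    constructor
    · rintro (rfl | ⟨k, hk, h1, h2⟩)
      · exact ⟨0, by simp, by simp, by simp⟩
      · exact ⟨k + 1, by simpa using hk, by rw [h1]; push_cast; ring, by simpa using h2⟩
    · rintro ⟨k, hk, h1, h2⟩
      cases k with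
      | zero =>
        left
        obtain ⟨p1, p2⟩ := p
        simp only [Nat.cast_zero, add_zero] at h1
        simp only [List.getElem?_cons_zero, Option.some.injEq] at h2
        simp [h1, h2]
      | succ k =>
        right
        exact ⟨k, by simp only [List.length_cons] at hk; omega,
          by rw [h1]; push_cast; ring, by simpa using h2⟩

lemma enumerate_pairwise {α : Type} :
    ∀ (l : List α) (s : Int), (PySem.List.enumerate l s).Pairwise (fun p q => p.1 < q.1) := by
  intro l
  induction l with
  | nil => intro s; exact List.Pairwise.nil
  | cons x t ih =>
    intro s
    rw [enumerate_cons]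
    refine List.Pairwise.cons ?_ (ih (s + 1))
    intro q hq
    rcases (mem_enumerate t (s + 1) q).mp hq with ⟨k, _, h1, _⟩
    show s < q.1
    omega

lemma enumerate_map_fst {α : Type} :
    ∀ (l : List α) (s : Int),
    (PySem.List.enumerate l s).map (fun p => p.1) = PySem.List.pyRange s (s + l.length) := by
  intro l
  induction l with
  | nil =>
    intro s
    rw [show PySem.List.enumerate ([] : List α) s = [] from rfl, List.map_nil,
        pyRange_nil_of_le (by simp)]
  | cons x t ih =>
    intro s
    rw [enumerate_cons, List.map_cons, ih (s + 1)]
    conv_rhs => rw [PySem.List.pyRange_one_cons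
      (show s < s + ((x :: t).length : Int) by simp only [List.length_cons]; push_cast; omega)]
    congr 2
    simp only [List.length_cons]
    push_cast
    ring

lemma v2f_inner_getD (f : List Int) (idx : Int) (d : PySem.Dict Int (List Int)) (v : Int) :
    ((PySem.List.dedup f).foldl (fun d w => d.insert w (d.getD w [] ++ [idx])) d).getD v []
      = d.getD v [] ++ if v ∈ f then [idx] else [] := by
  rw [show (fun (d : PySem.Dict Int (List Int)) (w : Int) => d.insert w (d.getD w [] ++ [idx]))
      = fun d w => d.modify w [] (· ++ [idx]) from rfl]
  rw [show (PySem.List.dedup f).foldl (fun d w => d.modify w [] (· ++ [idx])) d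
      = ((PySem.List.dedup f).map (fun w => (w, idx))).foldl
          (fun d p => d.modify p.1 [] (· ++ [p.2])) d from
        (List.foldl_map (f := fun w : Int => (w, idx))
          (g := fun (d : PySem.Dict Int (List Int)) (p : Int × Int) =>
            d.modify p.1 [] (· ++ [p.2]))
          (l := PySem.List.dedup f) (init := d)).symm]
  rw [PySem.Dict.getD_foldl_modify_append, List.filter_map, List.map_map]
  congr 1
  simp only [Function.comp_def]
  rw [List.filter_beq]
  rw [List.map_replicate]
  rw [show PySem.List.dedup f = PySem.Set.ofList f from rfl]
  by_cases hv : v ∈ f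
  · rw [List.count_eq_one_of_mem (PySem.Set.nodup_ofList f) ((PySem.Set.mem_ofList f v).mpr hv)]
    simp [hv]
  · rw [List.count_eq_zero.mpr (fun hc => hv ((PySem.Set.mem_ofList f v).mp hc))]
    simp [hv]

lemma v2f_fold_getD (l : List (Int × List Int)) (d : PySem.Dict Int (List Int)) (v : Int) :
    (l.foldl (fun d p => (PySem.List.dedup p.2).foldl
        (fun d w => d.insert w (d.getD w [] ++ [p.1])) d) d).getD v []
      = d.getD v [] ++ ((l.filter (fun p => decide (v ∈ p.2))).map (fun p => p.1)) := by
  induction l generalizing d with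
  | nil => simp
  | cons p t ih =>
    rw [List.foldl_cons, ih, v2f_inner_getD, List.filter_cons]
    by_cases hv : v ∈ p.2
    · simp [hv, List.append_assoc]
    · simp [hv]

lemma v2f_getD (faces : List (List Int)) (v : Int) :
    (v2fD faces).getD v [] = vIdx faces v := by
  unfold v2fD vIdx
  rw [v2f_fold_getD, PySem.Dict.getD_empty, List.nil_append]

lemma mem_vIdx (faces : List (List Int)) (v j : Int) :
    j ∈ vIdx faces v ↔ 0 ≤ j ∧ j < (faces.length : Int) ∧ v ∈ PySem.List.pyGetD faces j [] := by
  unfold vIdx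
  simp only [List.mem_map, List.mem_filter, decide_eq_true_eq]
  constructor
  · rintro ⟨p, ⟨hp, hv⟩, rfl⟩
    rcases (mem_enumerate faces 0 p).mp hp with ⟨k, hk, h1, h2⟩
    have h0 : 0 ≤ p.1 := by omega
    have hlt : p.1 < (faces.length : Int) := by omega
    refine ⟨h0, hlt, ?_⟩
    have hkt : p.1.toNat = k := by omega
    rw [PySem.List.pyGetD_of_nonneg faces [] h0, hkt, List.getD_eq_getElem?_getD, h2]
    exact hv
  · rintro ⟨h0, hlt, hv⟩
    refine ⟨(j, faces[j.toNat]'(by omega)), ⟨?_, ?_⟩, rfl⟩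
    · exact (mem_enumerate faces 0 (j, faces[j.toNat]'(by omega))).mpr
        ⟨j.toNat, by omega, by simp; omega, by rw [List.getElem?_eq_getElem (by omega : j.toNat < faces.length)]⟩
    · rw [PySem.List.pyGetD_of_nonneg faces [] h0, List.getD_eq_getElem?_getD,
          List.getElem?_eq_getElem (by omega : j.toNat < faces.length)] at hv
      exact hv

lemma vIdx_pairwise (faces : List (List Int)) (v : Int) :
    (vIdx faces v).Pairwise (· < ·) := by
  unfold vIdx
  rw [List.pairwise_map]
  exact (enumerate_pairwise faces 0).filter _

lemma rowCnt_eq_bigFold (faces : List (List Int)) (i : Int) (f : List Int) :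
    rowCnt faces i f
      = (bigL faces i f).foldl (fun c j => c.insert j (c.getD j 0 + 1))
          (PySem.Dict.empty : PySem.Dict Int Int) := by
  unfold rowCnt bigL
  rw [List.foldl_flatMap]
  apply PySem.List.foldl_congr_mem
  intro acc v _
  rw [v2f_getD]
  exact PySem.List.foldl_ite_eq_foldl_filter (fun j => j > i)
    (fun c j => c.insert j (c.getD j 0 + 1)) _ acc

lemma rowCnt_keys (faces : List (List Int)) (i : Int) (f : List Int) :
    (rowCnt faces i f).keys = PySem.Set.ofList (bigL faces i f) := by
  rw [rowCnt_eq_bigFold, PySem.Dict.keys_foldl_insert, PySem.Dict.keys_empty,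
      PySem.Set.update_nil_left]

lemma rowCnt_getD (faces : List (List Int)) (i : Int) (f : List Int) (j : Int) :
    (rowCnt faces i f).getD j 0 = (List.count j (bigL faces i f) : Int) := by
  rw [rowCnt_eq_bigFold, PySem.Dict.getD_foldl_insert_add_one, PySem.Dict.getD_empty, zero_add]

lemma sum_map_ite_count {α : Type} (p : α → Bool) (l : List α) :
    (l.map (fun x => if p x then 1 else 0)).sum = l.countP p := by
  induction l with
  | nil => rfl
  | cons x t ih =>
    rw [List.map_cons, List.sum_cons, ih, List.countP_cons]
    by_cases h : p x
    · simp [h]; omega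
    · simp [h]

lemma count_bigL (faces : List (List Int)) (i j : Int) (f : List Int) :
    List.count j (bigL faces i f)
      = if i < j ∧ 0 ≤ j ∧ j < (faces.length : Int) then
          List.countP (fun v => decide (v ∈ PySem.List.pyGetD faces j [])) (PySem.List.dedup f)
        else 0 := by
  by_cases h : i < j ∧ 0 ≤ j ∧ j < (faces.length : Int)
  · rw [if_pos h]
    unfold bigL
    rw [List.count_flatMap]
    have hcong : ∀ v ∈ PySem.List.dedup f,
        (List.count j ∘ fun v => (vIdx faces v).filter (fun x => decide (x > i))) v
          = if decide (v ∈ PySem.List.pyGetD faces j []) then 1 else 0 := by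
      intro v _
      simp only [Function.comp_apply]
      rw [List.count_filter (p := fun x => decide (x > i)) (a := j)
          (l := vIdx faces v) (by simp [h.1])]
      by_cases hm : v ∈ PySem.List.pyGetD faces j []
      · rw [List.count_eq_one_of_mem ((vIdx_pairwise faces v).imp (fun hlt => ne_of_lt hlt))
            ((mem_vIdx faces v j).mpr ⟨h.2.1, h.2.2, hm⟩)]
        simp [hm]
      · rw [List.count_eq_zero.mpr (fun hc => hm ((mem_vIdx faces v j).mp hc).2.2)]
        simp [hm]
    rw [List.map_congr_left hcong]
    exact sum_map_ite_count _ _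
  · rw [if_neg h]
    rw [List.count_eq_zero]
    intro hc
    unfold bigL at hc
    rcases List.mem_flatMap.mp hc with ⟨v, _, hj⟩
    rcases List.mem_filter.mp hj with ⟨hj1, hj2⟩
    rcases (mem_vIdx faces v j).mp hj1 with ⟨a, b, _⟩
    simp only [decide_eq_true_eq, gt_iff_lt] at hj2
    exact h ⟨hj2, a, b⟩

lemma condE_iff (faces : List (List Int)) (i j : Int) :
    condE faces i j = true ↔
      List.countP (fun v => decide (v ∈ PySem.List.pyGetD faces j []))
        (PySem.List.dedup (PySem.List.pyGetD faces i [])) = 2 := by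
  unfold condE
  rw [beq_iff_eq]
  rw [show PySem.Set.inter (PySem.Set.ofList (PySem.List.pyGetD faces i []))
        (PySem.Set.ofList (PySem.List.pyGetD faces j []))
      = (PySem.Set.ofList (PySem.List.pyGetD faces i [])).filter
          (fun x => PySem.Set.contains (PySem.Set.ofList (PySem.List.pyGetD faces j [])) x)
      from rfl]
  unfold PySem.Set.len
  rw [← List.countP_eq_length_filter]
  have hc : List.countP
      (fun x => PySem.Set.contains (PySem.Set.ofList (PySem.List.pyGetD faces j [])) x)
      (PySem.Set.ofList (PySem.List.pyGetD faces i []))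
      = List.countP (fun v => decide (v ∈ PySem.List.pyGetD faces j []))
          (PySem.List.dedup (PySem.List.pyGetD faces i [])) := by
    apply List.countP_congr
    intro a _
    rw [Bool.eq_iff_iff]
    simp [PySem.Set.mem_ofList]
  rw [hc]
  omega

lemma rowB_eq (faces : List (List Int)) (i : Int) (h0 : 0 ≤ i) :
    PySem.List.sorted
        (((rowCnt faces i (PySem.List.pyGetD faces i [])).items.filter
            (fun jc => jc.2 == 2)).map (fun jc => jc.1)) (fun j => j)
      = rowE faces i := by
  have hknd : (rowCnt faces i (PySem.List.pyGetD faces i [])).keys.Nodup := by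
    rw [rowCnt_keys]; exact PySem.Set.nodup_ofList _
  apply PySem.List.sorted_eq_of_perm_of_pairwise_lt
  · rw [PySem.Dict.items_eq_map_keys _ hknd 0, List.filter_map, List.map_map]
    simp only [Function.comp_def]
    rw [List.map_id']
    unfold rowE
    rw [List.perm_ext_iff_of_nodup ((pyRange_nodup _ _).filter _) (hknd.filter _)]
    intro j
    constructor
    · intro hj
      rcases List.mem_filter.mp hj with ⟨hjr, hjc⟩
      rw [PySem.List.mem_pyRange_one] at hjr
      have hcond := (condE_iff faces i j).mp hjc
      have hcnt : List.count j (bigL faces i (PySem.List.pyGetD faces i [])) = 2 := by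
        rw [count_bigL, if_pos ⟨by omega, by omega, hjr.2⟩]
        exact hcond
      refine List.mem_filter.mpr ⟨?_, ?_⟩
      · rw [rowCnt_keys]
        exact (PySem.Set.mem_ofList _ _).mpr (List.count_pos_iff.mp (by omega))
      · rw [rowCnt_getD, hcnt]
        simp
    · intro hj
      rcases List.mem_filter.mp hj with ⟨hjk, hjc⟩
      rw [rowCnt_getD, beq_iff_eq] at hjc
      have hc2 : List.count j (bigL faces i (PySem.List.pyGetD faces i [])) = 2 := by omega
      rw [count_bigL] at hc2
      by_cases hcond : i < j ∧ 0 ≤ j ∧ j < (faces.length : Int)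
      · rw [if_pos hcond] at hc2
        exact List.mem_filter.mpr ⟨PySem.List.mem_pyRange_one.mpr ⟨by omega, hcond.2.2⟩,
          (condE_iff faces i j).mpr hc2⟩
      · rw [if_neg hcond] at hc2
        exact absurd hc2 (by norm_num)
  · exact (pyRange_pairwise_lt _ _).filter _

lemma B_items (faces : List (List Int)) :
    face_adjacency_alt faces
      = ((edgesUpTo faces (faces.length : Int)).foldl gStep
          (PySem.Dict.empty : PySem.Dict Int (List Int))).items := by
  rw [face_adjacency_alt_eq]
  have hstep : ∀ (adj : PySem.Dict Int (List Int)), ∀ p ∈ PySem.List.enumerate faces,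
      ((PySem.List.sorted (((rowCnt faces p.1 p.2).items.filter (fun jc => jc.2 == 2)).map
          (fun jc => jc.1)) (fun j => j)).foldl (fun adj j => gStep adj (p.1, j)) adj)
        = ((rowE faces p.1).map (fun j => (p.1, j))).foldl gStep adj := by
    intro adj p hp
    rcases (mem_enumerate faces 0 p).mp hp with ⟨k, hk, h1, h2⟩
    have h0p : 0 ≤ p.1 := by omega
    have hp2 : p.2 = PySem.List.pyGetD faces p.1 [] := by
      rw [PySem.List.pyGetD_of_nonneg faces [] h0p, show p.1.toNat = k from by omega,
          List.getD_eq_getElem?_getD, h2, Option.getD_some]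
    rw [hp2, rowB_eq faces p.1 h0p, List.foldl_map]
  rw [PySem.List.foldl_congr_mem (PySem.List.enumerate faces) _
      (fun adj p => ((rowE faces p.1).map (fun j => (p.1, j))).foldl gStep adj)
      PySem.Dict.empty hstep]
  rw [show ((PySem.List.enumerate faces).foldl
        (fun adj p => ((rowE faces p.1).map (fun j => (p.1, j))).foldl gStep adj)
        (PySem.Dict.empty : PySem.Dict Int (List Int)))
      = (((PySem.List.enumerate faces).map (fun p => p.1)).foldl
        (fun adj i => ((rowE faces i).map (fun j => (i, j))).foldl gStep adj)
        (PySem.Dict.empty : PySem.Dict Int (List Int))) from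
      (List.foldl_map (f := fun p : Int × List Int => p.1)
        (g := fun (adj : PySem.Dict Int (List Int)) (i : Int) =>
          ((rowE faces i).map (fun j => (i, j))).foldl gStep adj)
        (l := PySem.List.enumerate faces) (init := PySem.Dict.empty)).symm]
  rw [enumerate_map_fst faces 0, zero_add]
  unfold edgesUpTo
  rw [List.foldl_flatMap]

-- ===== VERDICT (by name: the statement is the Claim_ definition above) =====
theorem face_adjacency_spec : Claim_equal_face_adjacency := by
  intro faces _
  show face_adjacency faces = face_adjacency_alt faces
  rw [A_items, B_items]
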